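-- pv_equiv track=rewrite | github.com/markwbennett/texas-criminal-defense-checklist | convert_checklist.py | process_form_section
-- ===== SOURCE A (Python) =====
-- def is_comment_or_command(line):
--     """
--     Check if a line is a comment or command (starts with #).
--
--     Args:
--         line (str): The line to check
--
--     Returns:
--         bool: True if the line is a comment or command, False otherwise
--     """
--     stripped = line.strip()
--     return stripped.startswith('#')
--
-- def is_form_end(line):
--     """
--     Check if a line ends a FORM section.
--
--     Args:
--         line (str): The line to check
--
--     Returns:
--         bool: True if the line is #FORMEND, False otherwise
--     """
--     return line.strip().upper() == '#FORMEND'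
--
-- def process_form_section(lines, start_index):
--     """
--     Process a form section between #FORM and #FORMEND markers.
--
--     Forms are kept together on one page and rendered as plain text without checkboxes.
--
--     Args:
--         lines (list): All lines from the input file
--         start_index (int): Index of the #FORM line
--
--     Returns:
--         tuple: (list of markdown content lines, index after #FORMEND)
--     """
--     content = []
--     content.append('<div class="form-section">')
--
--     i = start_index + 1
--     while i < len(lines):
--         line = lines[i]
--
--         if is_form_end(line):
--             content.append('</div>\n')
--             return (content, i + 1)
--
--         # Skip comment lines within the form
--         if is_comment_or_command(line):
--             i += 1
--             continue
--
--         # Preserve the line but strip leading tabs/spaces for form content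
--         stripped = line.lstrip('\t ')
--         if stripped:
--             content.append(stripped.rstrip() + '  ')  # Two spaces for line break in markdown
--         else:
--             content.append('')  # Preserve blank lines
--
--         i += 1
--
--     # If we get here, #FORMEND was not found
--     content.append('</div>\n')
--     return (content, i)
-- ===== SOURCE B (Python) =====
-- def process_form_section(lines, start_index):
--     n = len(lines)
--     i0 = start_index + 1
--     # pass 1: locate the first #FORMEND line (case-insensitive)
--     end = n
--     found = False
--     for j in range(i0, n):
--         if lines[j].strip().upper() == '#FORMEND':
--             end = j
--             found = True
--             break
--     # pass 2: format everything before the marker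
--     content = ['<div class="form-section">']
--     for j in range(i0, end):
--         line = lines[j]
--         if line.strip().startswith('#'):
--             continue
--         s = line.lstrip('\t ')
--         content.append(s.rstrip() + '  ' if s else '')
--     content.append('</div>\n')
--     return (content, end + 1 if found else max(i0, n))
-- ===== Notes on version B (the rewrite author's own statement) =====
-- stated objective: alternative
-- what changed: Replaces A's single while-loop with an early return by a two-pass decomposition: first scan locates the index of the first #FORMEND marker, then a separate formatting pass renders lines[start_index+1:end], with the returned index computed arithmetically (end+1 if found else max(start_index+1, len(lines))).
import Mathlib
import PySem

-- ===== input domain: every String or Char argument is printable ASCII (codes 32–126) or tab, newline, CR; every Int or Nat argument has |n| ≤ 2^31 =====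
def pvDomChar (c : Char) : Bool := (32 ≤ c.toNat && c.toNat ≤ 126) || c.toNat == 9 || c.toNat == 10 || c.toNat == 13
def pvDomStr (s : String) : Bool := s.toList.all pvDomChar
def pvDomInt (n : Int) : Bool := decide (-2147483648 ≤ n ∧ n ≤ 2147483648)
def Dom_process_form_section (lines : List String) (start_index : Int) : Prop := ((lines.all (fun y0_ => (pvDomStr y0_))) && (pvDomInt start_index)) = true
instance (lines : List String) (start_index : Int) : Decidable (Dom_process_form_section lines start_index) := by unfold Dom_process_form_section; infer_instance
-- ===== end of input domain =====

-- B replaces A's single while-loop by a two-pass decomposition (find the #FORMEND boundary, then format the lines before it); alternative structure, same cost.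


-- shared ports of the module helpers / line-level string operations both Pythons use
-- port of is_form_end: line.strip().upper() == '#FORMEND'
def pyIsFormEnd (line : String) : Bool :=
  PySem.Str.upper (PySem.Str.strip line) == "#FORMEND"
-- port of is_comment_or_command: line.strip().startswith('#')
def pyIsComment (line : String) : Bool :=
  PySem.Str.startswith (PySem.Str.strip line) "#"
-- exact port of line.lstrip('\t '): drop leading tab/space characters
def pyLstripTabSpace (line : String) : String :=
  String.ofList (line.toList.dropWhile (fun c => c == '\t' || c == ' '))
-- the formatted content line: stripped.rstrip() + '  ' if stripped else ''
def pyFormLine (line : String) : String :=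
  let stripped := pyLstripTabSpace line
  if stripped.toList.isEmpty then "" else String.ofList (PySem.Chars.rstrip stripped.toList ++ "  ".toList)

-- ===== PORT A =====
-- A's while-loop: mutable i and content, early return at #FORMEND
def pfsLoopA (lines : List String) (i : Int) (content : List String) : List String × Int :=
  if _h : i < (lines.length : Int) then
    let line := (PySem.List.pyGet? lines i).getD ""   -- some under Pre_
    if pyIsFormEnd line then (content ++ ["</div>\n"], i + 1)
    else if pyIsComment line then pfsLoopA lines (i + 1) content
    else pfsLoopA lines (i + 1) (content ++ [pyFormLine line])
  else (content ++ ["</div>\n"], i)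
termination_by ((lines.length : Int) - i).toNat
decreasing_by all_goals omega

def process_form_section (lines : List String) (start_index : Int) : List String × Int :=
  pfsLoopA lines (start_index + 1) ["<div class=\"form-section\">"]

-- ===== PORT B =====
-- pass 1: index of the first #FORMEND line at or after j
def pfsFindEnd (lines : List String) (j : Int) : Option Int :=
  if _h : j < (lines.length : Int) then
    if pyIsFormEnd ((PySem.List.pyGet? lines j).getD "") then some j
    else pfsFindEnd lines (j + 1)
  else none
termination_by ((lines.length : Int) - j).toNat
decreasing_by all_goals omega

-- pass 2: formatted content of the index range [j, e)
def pfsFormat (lines : List String) (j e : Int) : List String :=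
  if _h : j < e then
    let line := (PySem.List.pyGet? lines j).getD ""
    if pyIsComment line then pfsFormat lines (j + 1) e
    else pyFormLine line :: pfsFormat lines (j + 1) e
  else []
termination_by (e - j).toNat
decreasing_by all_goals omega

def process_form_section_alt (lines : List String) (start_index : Int) : List String × Int :=
  let n : Int := lines.length
  let i0 := start_index + 1
  match pfsFindEnd lines i0 with
  | some e => ("<div class=\"form-section\">" :: (pfsFormat lines i0 e ++ ["</div>\n"]), e + 1)
  | none => ("<div class=\"form-section\">" :: (pfsFormat lines i0 n ++ ["</div>\n"]), max i0 n)

-- ===== PRECONDITION & SPEC =====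
-- Pre_ excludes exactly the inputs where A raises IndexError: start_index + 1 < -len(lines)
-- makes the first lines[i] access go below the negative-wraparound range.
def Pre_process_form_section (lines : List String) (start_index : Int) : Prop :=
  -(lines.length : Int) ≤ start_index + 1
instance (lines : List String) (start_index : Int) : Decidable (Pre_process_form_section lines start_index) := by unfold Pre_process_form_section; infer_instance

def pvWitness_process_form_section : List String × Int := (["Name: ______", "# note", "#formend", "after"], 0)

def Spec_process_form_section (lines : List String) (start_index : Int) (out : List String × Int) : Prop := out = process_form_section_alt lines start_index
instance (lines : List String) (start_index : Int) (out : List String × Int) : Decidable (Spec_process_form_section lines start_index out) := by unfold Spec_process_form_section; infer_instance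

-- ===== CLAIM (what is proved, stated in full; the proofs are below) =====
def Claim_equal_process_form_section : Prop := ∀ (lines : List String) (start_index : Int), Dom_process_form_section lines start_index → Pre_process_form_section lines start_index → Spec_process_form_section lines start_index (process_form_section lines start_index)

-- ===== LEMMAS AND PROOFS =====

lemma pfsFindEnd_lb (lines : List String) (j e : Int) (h : pfsFindEnd lines j = some e) : j ≤ e := by
  fun_induction pfsFindEnd lines j with
  | case1 j hj hfe => simp_all
  | case2 j hj hfe ih => have := ih h; omega
  | case3 j hj => simp_all

-- A's loop computes exactly B's two passes glued together
lemma pfsLoopA_eq (lines : List String) (i : Int) (content : List String) :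
    pfsLoopA lines i content =
      match pfsFindEnd lines i with
      | some e => (content ++ (pfsFormat lines i e ++ ["</div>\n"]), e + 1)
      | none => (content ++ (pfsFormat lines i lines.length ++ ["</div>\n"]), max i (lines.length : Int)) := by
  fun_induction pfsLoopA lines i content with
  | case1 i content hi line hfe =>
    have hfind : pfsFindEnd lines i = some i := by rw [pfsFindEnd, dif_pos hi, if_pos hfe]
    have hfmt : pfsFormat lines i i = [] := by rw [pfsFormat, dif_neg (lt_irrefl i)]
    simp [hfind, hfmt]
  | case2 i content hi line hfe hc ih =>
    have hfind : pfsFindEnd lines i = pfsFindEnd lines (i + 1) := by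
      rw [pfsFindEnd, dif_pos hi, if_neg hfe]
    rw [ih, hfind]
    cases he : pfsFindEnd lines (i + 1) with
    | some e =>
      have hle := pfsFindEnd_lb lines (i + 1) e he
      have hfmt : pfsFormat lines i e = pfsFormat lines (i + 1) e := by
        rw [pfsFormat, dif_pos (show i < e by omega), if_pos hc]
      simp [hfmt]
    | none =>
      have hfmt : pfsFormat lines i (lines.length : Int) = pfsFormat lines (i + 1) (lines.length : Int) := by
        rw [pfsFormat, dif_pos hi, if_pos hc]
      have hm : max (i + 1) (lines.length : Int) = max i (lines.length : Int) := by omega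
      simp [hfmt, hm]
  | case3 i content hi line hfe hc ih =>
    have hfind : pfsFindEnd lines i = pfsFindEnd lines (i + 1) := by
      rw [pfsFindEnd, dif_pos hi, if_neg hfe]
    rw [ih, hfind]
    cases he : pfsFindEnd lines (i + 1) with
    | some e =>
      have hle := pfsFindEnd_lb lines (i + 1) e he
      have hfmt : pfsFormat lines i e = pyFormLine line :: pfsFormat lines (i + 1) e := by
        rw [pfsFormat, dif_pos (show i < e by omega), if_neg hc]
      simp [hfmt]
    | none =>
      have hfmt : pfsFormat lines i (lines.length : Int)
          = pyFormLine line :: pfsFormat lines (i + 1) (lines.length : Int) := by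
        rw [pfsFormat, dif_pos hi, if_neg hc]
      have hm : max (i + 1) (lines.length : Int) = max i (lines.length : Int) := by omega
      simp [hfmt, hm]
  | case4 i content hi =>
    have hfind : pfsFindEnd lines i = none := by rw [pfsFindEnd, dif_neg hi]
    have hfmt : pfsFormat lines i (lines.length : Int) = [] := by rw [pfsFormat, dif_neg hi]
    have hm : max i (lines.length : Int) = i := by omega
    simp [hfind, hfmt, hm]

-- ===== VERDICT (by name: the statement is the Claim_ definition above) =====
theorem process_form_section_spec : Claim_equal_process_form_section := by
  intro lines start_index _hdom _hpre
  show _ = _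
  rw [process_form_section, pfsLoopA_eq, process_form_section_alt]
  cases pfsFindEnd lines (start_index + 1) <;> simp
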